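-- pv_equiv track=rewrite | github.com/r10222035/3-4-Higgs-Collider-Study | Analysis/chisq_method_diHiggs.py | compare_jet_list_diHiggs
-- ===== SOURCE A (Python) =====
-- import itertools
--
-- def compare_jet_list_diHiggs(pair1, pair2, nh_max=2):
--     h1_true = {pair1[0],pair1[1]}
--     h2_true = {pair1[2],pair1[3]}
--
--     h1_test = {pair2[0],pair2[1]}
--     h2_test = {pair2[2],pair2[3]}
--
--     test_h = [h1_test, h2_test]
--
--     nh = 0
--     for id1, id2 in itertools.permutations([0,1]):
--         h1 = test_h[id1]
--         h2 = test_h[id2]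
--         if h1_true == h1:
--             nh = 1
--             if h2_true == h2:
--                 nh = 2
--
--     same = True if nh==nh_max else False
--     return same, nh
-- ===== SOURCE B (Python) =====
-- def compare_jet_list_diHiggs(pair1, pair2, nh_max=2):
--     # canonical key for each Higgs: the sorted tuple of its (deduplicated) jets
--     def key(x, y):
--         return tuple(sorted({x, y}))
--
--     def canon(p, q):
--         # canonical (order-free) form of a pairing: its two keys in tuple order
--         return (p, q) if p <= q else (q, p)
--
--     kt1, kt2 = key(pair1[0], pair1[1]), key(pair1[2], pair1[3])
--     ks1, ks2 = key(pair2[0], pair2[1]), key(pair2[2], pair2[3])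
--
--     if canon(kt1, kt2) == canon(ks1, ks2):
--         nh = 2
--     elif kt1 in (ks1, ks2):
--         nh = 1
--     else:
--         nh = 0
--     return nh == nh_max, nh
-- ===== Notes on version B (the rewrite author's own statement) =====
-- stated objective: alternative
-- what changed: Replaces A's permutation loop over alignments (with last-write-wins nh) by canonicalisation: each Higgs becomes a sorted key, each pairing a canonically ordered pair of keys, and nh is read off from canonical-pairing equality (2), key membership (1), or neither (0).
import Mathlib
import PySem

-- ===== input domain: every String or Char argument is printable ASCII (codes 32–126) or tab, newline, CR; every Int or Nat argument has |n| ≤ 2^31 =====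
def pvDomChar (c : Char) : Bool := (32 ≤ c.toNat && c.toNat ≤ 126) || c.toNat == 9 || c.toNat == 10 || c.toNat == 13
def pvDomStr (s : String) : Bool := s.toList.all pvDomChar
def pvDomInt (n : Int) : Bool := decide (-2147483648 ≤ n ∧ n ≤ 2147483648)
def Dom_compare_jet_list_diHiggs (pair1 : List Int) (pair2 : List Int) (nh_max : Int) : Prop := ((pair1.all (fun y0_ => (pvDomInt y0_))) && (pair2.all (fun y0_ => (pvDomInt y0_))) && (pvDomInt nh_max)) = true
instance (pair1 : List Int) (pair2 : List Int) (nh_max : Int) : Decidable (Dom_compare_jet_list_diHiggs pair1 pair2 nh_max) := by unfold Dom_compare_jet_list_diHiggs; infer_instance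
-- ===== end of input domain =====

-- B replaces A's permutations loop by canonicalisation (sorted keys + canonically ordered key pair); objective: alternative, no speed claim. Equivalence on inputs where A returns (pair lists of length >= 4).


-- ===== PORT A =====
-- helper for '{pair[i], pair[j]}': pyGetD with default 0 is total; Pre_ guarantees the
-- indices are in range (Python raises IndexError otherwise).
def pvPairSet (xs : List Int) (i j : Int) : PySem.Set Int :=
  PySem.Set.ofList [PySem.List.pyGetD xs i 0, PySem.List.pyGetD xs j 0]

def compare_jet_list_diHiggs (pair1 : List Int) (pair2 : List Int) (nh_max : Int) : Bool × Int :=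
  let h1_true := pvPairSet pair1 0 1
  let h2_true := pvPairSet pair1 2 3
  let h1_test := pvPairSet pair2 0 1
  let h2_test := pvPairSet pair2 2 3
  let test_h : List (PySem.Set Int) := [h1_test, h2_test]
  let nh : Int := (PySem.List.permutations [(0 : Int), 1] 2).foldl (fun nh perm =>
    let h1 := PySem.List.pyGetD test_h (PySem.List.pyGetD perm 0 0) []
    let h2 := PySem.List.pyGetD test_h (PySem.List.pyGetD perm 1 0) []
    if PySem.Set.equal h1_true h1 then
      (if PySem.Set.equal h2_true h2 then 2 else 1)
    else nh) 0
  (if nh == nh_max then true else false, nh)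

-- ===== PORT B =====
-- Source B's key(x, y) = tuple(sorted({x, y})): the canonical, order-free name of a Higgs.
def pvKey (x y : Int) : List Int :=
  PySem.List.sorted (PySem.Set.ofList [x, y]) (fun v => v) false

-- Python's lexicographic '<=' on tuples of ints, transcribed by hand (exact for int tuples).
def pvLexLe : List Int → List Int → Bool
  | [], _ => true
  | _ :: _, [] => false
  | a :: as, b :: bs => if a < b then true else if b < a then false else pvLexLe as bs

-- Source B's canon(p, q): the pairing's two keys in tuple order.
def pvCanon (p q : List Int) : List Int × List Int :=
  if pvLexLe p q then (p, q) else (q, p)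

def compare_jet_list_diHiggs_alt (pair1 : List Int) (pair2 : List Int) (nh_max : Int) : Bool × Int :=
  let kt1 := pvKey (PySem.List.pyGetD pair1 0 0) (PySem.List.pyGetD pair1 1 0)
  let kt2 := pvKey (PySem.List.pyGetD pair1 2 0) (PySem.List.pyGetD pair1 3 0)
  let ks1 := pvKey (PySem.List.pyGetD pair2 0 0) (PySem.List.pyGetD pair2 1 0)
  let ks2 := pvKey (PySem.List.pyGetD pair2 2 0) (PySem.List.pyGetD pair2 3 0)
  let nh : Int :=
    if pvCanon kt1 kt2 == pvCanon ks1 ks2 then 2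
    else if kt1 == ks1 || kt1 == ks2 then 1
    else 0
  (nh == nh_max, nh)

-- ===== PRECONDITION & SPEC =====
-- Pre_ excludes exactly the inputs on which Python A raises IndexError (a pair list with fewer than 4 entries).
def Pre_compare_jet_list_diHiggs (pair1 : List Int) (pair2 : List Int) (nh_max : Int) : Prop :=
  4 ≤ pair1.length ∧ 4 ≤ pair2.length
instance (pair1 : List Int) (pair2 : List Int) (nh_max : Int) : Decidable (Pre_compare_jet_list_diHiggs pair1 pair2 nh_max) := by unfold Pre_compare_jet_list_diHiggs; infer_instance
def pvWitness_compare_jet_list_diHiggs : List Int × List Int × Int := ([1, 2, 3, 4], [2, 1, 4, 3], 2)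

def Spec_compare_jet_list_diHiggs (pair1 : List Int) (pair2 : List Int) (nh_max : Int) (out : Bool × Int) : Prop := out = compare_jet_list_diHiggs_alt pair1 pair2 nh_max
instance (pair1 : List Int) (pair2 : List Int) (nh_max : Int) (out : Bool × Int) : Decidable (Spec_compare_jet_list_diHiggs pair1 pair2 nh_max out) := by unfold Spec_compare_jet_list_diHiggs; infer_instance

-- ===== CLAIM (what is proved, stated in full; the proofs are below) =====
def Claim_equal_compare_jet_list_diHiggs : Prop := ∀ (pair1 : List Int) (pair2 : List Int) (nh_max : Int), Dom_compare_jet_list_diHiggs pair1 pair2 nh_max → Pre_compare_jet_list_diHiggs pair1 pair2 nh_max → Spec_compare_jet_list_diHiggs pair1 pair2 nh_max (compare_jet_list_diHiggs pair1 pair2 nh_max)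

-- ===== LEMMAS AND PROOFS =====
theorem pvLexLe_total (p q : List Int) : pvLexLe p q = true ∨ pvLexLe q p = true := by
  induction p generalizing q with
  | nil => left; rfl
  | cons a as ih =>
    cases q with
    | nil => right; rfl
    | cons b bs =>
      simp only [pvLexLe]
      rcases lt_trichotomy a b with h | h | h
      · left; simp [h]
      · subst h
        rcases ih bs with h2 | h2 <;> simp [h2]
      · right; simp [h]

theorem pvLexLe_antisymm (p q : List Int) (h1 : pvLexLe p q = true) (h2 : pvLexLe q p = true) : p = q := by
  induction p generalizing q with
  | nil =>
    cases q with
    | nil => rfl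
    | cons b bs => simp [pvLexLe] at h2
  | cons a as ih =>
    cases q with
    | nil => simp [pvLexLe] at h1
    | cons b bs =>
      simp only [pvLexLe] at h1 h2
      rcases lt_trichotomy a b with h | h | h
      · simp [h, not_lt.mpr h.le] at h2
      · subst h
        simp only [lt_irrefl, if_false] at h1 h2
        exact congrArg (a :: ·) (ih bs h1 h2)
      · simp [h, not_lt.mpr h.le] at h1

theorem pvCanon_eq_iff (p q r s : List Int) :
    pvCanon p q = pvCanon r s ↔ (p = r ∧ q = s) ∨ (p = s ∧ q = r) := by
  unfold pvCanon
  by_cases h1 : pvLexLe p q = true <;> by_cases h2 : pvLexLe r s = true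
  · rw [if_pos h1, if_pos h2, Prod.mk.injEq]
    constructor
    · exact fun h => Or.inl h
    · rintro (⟨e1, e2⟩ | ⟨e1, e2⟩)
      · exact ⟨e1, e2⟩
      · subst e1; subst e2
        have := pvLexLe_antisymm p q h1 h2
        exact ⟨this, this.symm⟩
  · rw [if_pos h1, if_neg h2, Prod.mk.injEq]
    constructor
    · exact fun h => Or.inr h
    · rintro (⟨e1, e2⟩ | ⟨e1, e2⟩)
      · subst e1; subst e2; exact absurd h1 h2
      · exact ⟨e1, e2⟩
  · rw [if_neg h1, if_pos h2, Prod.mk.injEq]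
    constructor
    · exact fun h => Or.inr ⟨h.2, h.1⟩
    · rintro (⟨e1, e2⟩ | ⟨e1, e2⟩)
      · subst e1; subst e2; exact absurd h2 h1
      · exact ⟨e2, e1⟩
  · rw [if_neg h1, if_neg h2, Prod.mk.injEq]
    constructor
    · exact fun h => Or.inl ⟨h.2, h.1⟩
    · rintro (⟨e1, e2⟩ | ⟨e1, e2⟩)
      · exact ⟨e2, e1⟩
      · subst e1; subst e2
        rcases pvLexLe_total p q with ht | ht
        · exact absurd ht h1
        · exact absurd ht h2

-- sorted(set) is a canonical name: two nodup lists have equal id-sorts iff they are equal as sets.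
theorem pvSorted_eq_iff_equal (s t : PySem.Set Int) (hs : s.Nodup) (ht : t.Nodup) :
    (PySem.List.sorted s (fun v => v) false = PySem.List.sorted t (fun v => v) false)
      ↔ PySem.Set.equal s t = true := by
  rw [PySem.List.sorted_id_eq_sorted_id_iff_perm, PySem.Set.equal_iff,
    List.perm_ext_iff_of_nodup hs ht]

theorem pvKey_eq_iff (xs ys : List Int) (i j k l : Int) :
    (pvKey (PySem.List.pyGetD xs i 0) (PySem.List.pyGetD xs j 0)
       = pvKey (PySem.List.pyGetD ys k 0) (PySem.List.pyGetD ys l 0))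
      ↔ PySem.Set.equal (pvPairSet xs i j) (pvPairSet ys k l) = true :=
  pvSorted_eq_iff_equal _ _ (PySem.Set.nodup_ofList _) (PySem.Set.nodup_ofList _)

theorem pvBool_of_iff {p : Prop} [Decidable p] {b : Bool} (h : p ↔ b = true) : b = decide p := by
  by_cases hp : p
  · simp [hp, h.mp hp]
  · simp only [hp, decide_false]
    exact Bool.eq_false_iff.mpr (fun hb => hp (h.mpr hb))

set_option maxHeartbeats 2000000 in
theorem compare_jet_list_diHiggs_eq_alt (pair1 pair2 : List Int) (nh_max : Int) :
    compare_jet_list_diHiggs pair1 pair2 nh_max = compare_jet_list_diHiggs_alt pair1 pair2 nh_max := by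
  unfold compare_jet_list_diHiggs compare_jet_list_diHiggs_alt
  simp only [show PySem.List.permutations [(0 : Int), 1] 2 = [[0, 1], [1, 0]] from rfl,
    List.foldl,
    show ∀ (a b : PySem.Set Int), PySem.List.pyGetD [a, b] (PySem.List.pyGetD [(1 : Int), 0] 0 0) [] = b from fun _ _ => rfl,
    show ∀ (a b : PySem.Set Int), PySem.List.pyGetD [a, b] (PySem.List.pyGetD [(1 : Int), 0] 1 0) [] = a from fun _ _ => rfl,
    show ∀ (a b : PySem.Set Int), PySem.List.pyGetD [a, b] (PySem.List.pyGetD [(0 : Int), 1] 0 0) [] = a from fun _ _ => rfl,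
    show ∀ (a b : PySem.Set Int), PySem.List.pyGetD [a, b] (PySem.List.pyGetD [(0 : Int), 1] 1 0) [] = b from fun _ _ => rfl,
    pvBool_of_iff (pvKey_eq_iff pair1 pair2 0 1 0 1),
    pvBool_of_iff (pvKey_eq_iff pair1 pair2 2 3 2 3),
    pvBool_of_iff (pvKey_eq_iff pair1 pair2 0 1 2 3),
    pvBool_of_iff (pvKey_eq_iff pair1 pair2 2 3 0 1),
    decide_eq_true_eq, beq_iff_eq, Bool.or_eq_true, pvCanon_eq_iff]
  split_ifs with h1 h2 h3 h4 h5 h6 h7 h8 h9 h10 h11 h12 h13 h14 h15 h16 h17 h18 h19 h20 <;>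
    first
      | rfl
      | tauto
      | simp_all

-- ===== VERDICT (by name: the statement is the Claim_ definition above) =====
theorem compare_jet_list_diHiggs_spec : Claim_equal_compare_jet_list_diHiggs := by
  intro pair1 pair2 nh_max _ _
  unfold Spec_compare_jet_list_diHiggs
  exact compare_jet_list_diHiggs_eq_alt pair1 pair2 nh_max
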